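-- pv_equiv track=rewrite | github.com/tintinrevient/methods-of-ai-research | part-1b/source-code/keyword_baseline_vl.py | __keywordMatching
-- ===== SOURCE A (Python) =====
-- def __keywordMatching(utterance, repetition = False):
--
--     dialog_acts = {}
--     # Dialog acts keywords arrys
--     ack_keywords = ["ackn", "ack"]
--     affirm_keywords = ["affirm"]
--     bye_keywords = ["bye"]
--     confirm_keywords = ["confirm"]
--     deny_keywords = ["deny"]
--     hello_keywords = ["hello"]
--     inform_keywords = ["inform"]
--     negate_keywords = ["negate"]
--     null_keywords = ["null"]
--     repeat_keywords = ["repeat"]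
--     reqalts_keywords = ["reqalts"]
--     reqmore_keywords = ["reqmore"]
--     request_keywords = ["request"]
--     restart_keywords = ["restart"]
--     thankyou_keywords = ["thankyou"]
--
--     dialog_acts["ack_keywords"] = ack_keywords
--     dialog_acts["affirm_keywords"] = affirm_keywords
--     dialog_acts["bye_keywords"] = bye_keywords
--     dialog_acts["confirm_keywords"] = confirm_keywords
--     dialog_acts["deny_keywords"] = deny_keywords
--     dialog_acts["hello_keywords"] = hello_keywords
--     dialog_acts["inform_keywords"] = inform_keywords
--     dialog_acts["negate_keywords"] = negate_keywords
--     dialog_acts["null_keywords"] = null_keywords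
--     dialog_acts["repeat_keywords"] = repeat_keywords
--     dialog_acts["reqalts_keywords"] = reqalts_keywords
--     dialog_acts["reqmore_keywords"] = reqmore_keywords
--     dialog_acts["request_keywords"] = request_keywords
--     dialog_acts["restart_keywords"] = restart_keywords
--     dialog_acts["thankyou_keywords"] = thankyou_keywords
--
--     utterance_keywords = utterance.split(" ")
--
--     utterance_matches = {} #not really used but could be handy
--     utterance_matches_len = {}
--
--     if repetition == False:
--         for dialog_act in dialog_acts:
--             matches = set(dialog_acts[dialog_act]).intersection(utterance_keywords)
--             utterance_matches[dialog_act] = matches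
--             utterance_matches_len[dialog_act] = len(matches)
--     else:
--         for dialog_act in dialog_acts:
--             matches = 0
--             for keyword in dialog_acts[dialog_act]:
--                 matches = matches + utterance_keywords.count(keyword)
--             utterance_matches[dialog_act] = set(dialog_acts[dialog_act]).intersection(utterance_keywords)
--             utterance_matches_len[dialog_act] = matches
--     max_matches = max(utterance_matches_len.values())
--     dialog_matches = [ k for k, v in utterance_matches_len.items() if v == max_matches]
--
--     return dialog_matches
-- ===== SOURCE B (Python) =====
-- def __keywordMatching(utterance, repetition = False):
--     # One inverted keyword->act lookup and a single pass over the words,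
--     # instead of a per-act scan of the word list.
--     acts = {
--         "ack_keywords": ["ackn", "ack"],
--         "affirm_keywords": ["affirm"],
--         "bye_keywords": ["bye"],
--         "confirm_keywords": ["confirm"],
--         "deny_keywords": ["deny"],
--         "hello_keywords": ["hello"],
--         "inform_keywords": ["inform"],
--         "negate_keywords": ["negate"],
--         "null_keywords": ["null"],
--         "repeat_keywords": ["repeat"],
--         "reqalts_keywords": ["reqalts"],
--         "reqmore_keywords": ["reqmore"],
--         "request_keywords": ["request"],
--         "restart_keywords": ["restart"],
--         "thankyou_keywords": ["thankyou"],
--     }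
--     inverted = {kw: act for act, kws in acts.items() for kw in kws}
--     words = utterance.split(" ")
--     if repetition:
--         scores = {act: 0 for act in acts}
--         for word in words:
--             act = inverted.get(word)
--             if act is not None:
--                 scores[act] += 1
--     else:
--         seen = {act: set() for act in acts}
--         for word in words:
--             act = inverted.get(word)
--             if act is not None:
--                 seen[act].add(word)
--         scores = {act: len(s) for act, s in seen.items()}
--     best = max(scores.values())
--     return [act for act, score in scores.items() if score == best]
-- ===== Notes on version B (the rewrite author's own statement) =====
-- stated objective: idiomatic
-- what changed: Replaces the per-act scans of the word list (set intersections / per-keyword count passes) with one inverted keyword-to-act dict and a single pass over the utterance's words accumulating per-act scores (distinct-word sets when repetition=False, counters when repetition=True).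
import Mathlib
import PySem

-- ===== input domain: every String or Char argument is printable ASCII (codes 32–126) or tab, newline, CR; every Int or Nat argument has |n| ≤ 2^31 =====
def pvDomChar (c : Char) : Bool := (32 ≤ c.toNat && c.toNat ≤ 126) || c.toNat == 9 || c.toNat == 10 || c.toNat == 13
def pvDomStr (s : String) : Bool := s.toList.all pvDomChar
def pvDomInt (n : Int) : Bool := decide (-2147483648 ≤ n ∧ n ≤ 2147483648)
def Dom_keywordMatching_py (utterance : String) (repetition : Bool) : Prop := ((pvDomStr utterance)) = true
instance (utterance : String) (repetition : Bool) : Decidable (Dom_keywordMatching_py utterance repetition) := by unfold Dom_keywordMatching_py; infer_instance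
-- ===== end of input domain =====

-- B replaces A's per-act scans of the word list by one inverted keyword→act lookup dict and a
-- single pass over the utterance's words (objective: idiomatic; equal output proved below).

-- ===== PORT A =====
-- the dialog_acts dict A builds by 15 inserts
def kmActs : PySem.Dict String (List String) :=
  (((((((((((((((PySem.Dict.empty.insert "ack_keywords" ["ackn", "ack"]).insert
    "affirm_keywords" ["affirm"]).insert "bye_keywords" ["bye"]).insert
    "confirm_keywords" ["confirm"]).insert "deny_keywords" ["deny"]).insert
    "hello_keywords" ["hello"]).insert "inform_keywords" ["inform"]).insert
    "negate_keywords" ["negate"]).insert "null_keywords" ["null"]).insert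
    "repeat_keywords" ["repeat"]).insert "reqalts_keywords" ["reqalts"]).insert
    "reqmore_keywords" ["reqmore"]).insert "request_keywords" ["request"]).insert
    "restart_keywords" ["restart"]).insert "thankyou_keywords" ["thankyou"])

def keywordMatching_py (utterance : String) (repetition : Bool) : List String :=
  let dialog_acts := kmActs
  let utterance_keywords := (PySem.Str.split? utterance " ").getD []
  let utterance_matches_len : PySem.Dict String Int :=
    if repetition = false then
      dialog_acts.items.foldl (fun d kv =>
        d.insert kv.1 (PySem.Set.len (PySem.Set.inter (PySem.Set.ofList kv.2) utterance_keywords)))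
        PySem.Dict.empty
    else
      dialog_acts.items.foldl (fun d kv =>
        d.insert kv.1 (kv.2.foldl (fun m k => m + (utterance_keywords.count k : Int)) 0))
        PySem.Dict.empty
  match PySem.List.max? utterance_matches_len.values (fun v => v) with
  | some max_matches =>
      (utterance_matches_len.items.filter (fun kv => kv.2 == max_matches)).map (fun kv => kv.1)
  | none => []

-- ===== PORT B =====
-- B's inverted keyword → dialog-act map (the dict comprehension in Source B)
def kmInv : PySem.Dict String String := PySem.Dict.ofList
  [("ackn", "ack_keywords"),
   ("ack", "ack_keywords"),
   ("affirm", "affirm_keywords"),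
   ("bye", "bye_keywords"),
   ("confirm", "confirm_keywords"),
   ("deny", "deny_keywords"),
   ("hello", "hello_keywords"),
   ("inform", "inform_keywords"),
   ("negate", "negate_keywords"),
   ("null", "null_keywords"),
   ("repeat", "repeat_keywords"),
   ("reqalts", "reqalts_keywords"),
   ("reqmore", "reqmore_keywords"),
   ("request", "request_keywords"),
   ("restart", "restart_keywords"),
   ("thankyou", "thankyou_keywords")]

-- the act keys, in the insertion order of Source B's `acts` dict
def kmActNames : List String :=
  ["ack_keywords", "affirm_keywords", "bye_keywords", "confirm_keywords", "deny_keywords", "hello_keywords", "inform_keywords", "negate_keywords", "null_keywords", "repeat_keywords", "reqalts_keywords", "reqmore_keywords", "request_keywords", "restart_keywords", "thankyou_keywords"]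

def keywordMatching_py_alt (utterance : String) (repetition : Bool) : List String :=
  let words := (PySem.Str.split? utterance " ").getD []
  let scores : PySem.Dict String Int :=
    if repetition then
      -- `act = inverted.get(word); if act is not None: scores[act] += 1`
      words.foldl (fun d w => (kmInv.get? w).elim d (fun act => d.modify act 0 (· + 1)))
        (kmActNames.foldl (fun d a => d.insert a 0) PySem.Dict.empty)
    else
      -- `act = inverted.get(word); if act is not None: seen[act].add(word)`
      let seen := words.foldl (fun d w => (kmInv.get? w).elim d (fun act => d.modify act [] (fun s => PySem.Set.add s w)))
        (kmActNames.foldl (fun d a => d.insert a ([] : PySem.Set String)) PySem.Dict.empty)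
      PySem.Dict.mk (seen.items.map (fun kv => (kv.1, PySem.Set.len kv.2)))
  match PySem.List.max? scores.values (fun v => v) with
  | some best => (scores.items.filter (fun kv => kv.2 == best)).map (fun kv => kv.1)
  | none => []

-- ===== PRECONDITION & SPEC =====
def Spec_keywordMatching_py (utterance : String) (repetition : Bool) (out : List String) : Prop := out = keywordMatching_py_alt utterance repetition
instance (utterance : String) (repetition : Bool) (out : List String) : Decidable (Spec_keywordMatching_py utterance repetition out) := by unfold Spec_keywordMatching_py; infer_instance

-- ===== CLAIM (what is proved, stated in full; the proofs are below) =====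
def Claim_equal_keywordMatching_py : Prop := ∀ (utterance : String) (repetition : Bool), Dom_keywordMatching_py utterance repetition → Spec_keywordMatching_py utterance repetition (keywordMatching_py utterance repetition)

-- ===== LEMMAS AND PROOFS =====

-- the items of A's dialog_acts dict, as a literal association list
def kmPairs : List (String × List String) :=
  [("ack_keywords", ["ackn", "ack"]),
   ("affirm_keywords", ["affirm"]),
   ("bye_keywords", ["bye"]),
   ("confirm_keywords", ["confirm"]),
   ("deny_keywords", ["deny"]),
   ("hello_keywords", ["hello"]),
   ("inform_keywords", ["inform"]),
   ("negate_keywords", ["negate"]),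
   ("null_keywords", ["null"]),
   ("repeat_keywords", ["repeat"]),
   ("reqalts_keywords", ["reqalts"]),
   ("reqmore_keywords", ["reqmore"]),
   ("request_keywords", ["request"]),
   ("restart_keywords", ["restart"]),
   ("thankyou_keywords", ["thankyou"])]

theorem km_items_mk {ν : Type} (l : List (String × ν)) : (PySem.Dict.mk l).items = l := rfl

theorem kmActs_items : kmActs.items = kmPairs := by
  simp [kmActs, kmPairs, PySem.Dict.items_insert, PySem.Dict.contains_insert, PySem.Dict.empty]

theorem kmInv_eq : kmInv = PySem.Dict.mk
  [("ackn", "ack_keywords"),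
   ("ack", "ack_keywords"),
   ("affirm", "affirm_keywords"),
   ("bye", "bye_keywords"),
   ("confirm", "confirm_keywords"),
   ("deny", "deny_keywords"),
   ("hello", "hello_keywords"),
   ("inform", "inform_keywords"),
   ("negate", "negate_keywords"),
   ("null", "null_keywords"),
   ("repeat", "repeat_keywords"),
   ("reqalts", "reqalts_keywords"),
   ("reqmore", "reqmore_keywords"),
   ("request", "request_keywords"),
   ("restart", "restart_keywords"),
   ("thankyou", "thankyou_keywords")] := by
  apply PySem.Dict.ext
  simp [kmInv, PySem.Dict.ofList, PySem.Dict.update, PySem.Dict.items_insert,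
    PySem.Dict.contains_insert, PySem.Dict.empty, List.foldl]

theorem kmInv_get?_eq (w : String) : kmInv.get? w =
    (if "ackn" = w then some "ack_keywords" else if "ack" = w then some "ack_keywords" else if "affirm" = w then some "affirm_keywords" else if "bye" = w then some "bye_keywords" else if "confirm" = w then some "confirm_keywords" else if "deny" = w then some "deny_keywords" else if "hello" = w then some "hello_keywords" else if "inform" = w then some "inform_keywords" else if "negate" = w then some "negate_keywords" else if "null" = w then some "null_keywords" else if "repeat" = w then some "repeat_keywords" else if "reqalts" = w then some "reqalts_keywords" else if "reqmore" = w then some "reqmore_keywords" else if "request" = w then some "request_keywords" else if "restart" = w then some "restart_keywords" else if "thankyou" = w then some "thankyou_keywords" else none) := by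
  rw [kmInv_eq]
  simp only [PySem.Dict.get?_mk_cons, beq_iff_eq,
    show ∀ x, (PySem.Dict.mk ([] : List (String × String))).get? x = none from fun _ => rfl]

-- push a function through an `if` (used to evaluate lookups in the literal inverted dict)
theorem km_beq_ite {c : Prop} [Decidable c] (x y z : Option String) :
    ((if c then x else y) == z) = (if c then x == z else y == z) := by
  split_ifs <;> rfl

theorem km_getD_ite {ν : Type} {c : Prop} [Decidable c] (x y : Option ν) (d : ν) :
    (if c then x else y).getD d = (if c then x.getD d else y.getD d) := by
  split_ifs <;> rfl

theorem km_elim_some {ν : Type} (b : String) (y : ν) (f : String → ν) :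
    (some b).elim y f = f b := rfl

-- for every act (a, ks) of the table: a word maps to act a exactly when it is one of ks
set_option maxHeartbeats 1000000 in
theorem km_hinv (a : String) (ks : List String) (h : (a, ks) ∈ kmPairs) (w : String) :
    (kmInv.get? w == some a) = decide (w ∈ ks) := by
  simp only [kmPairs, List.mem_cons, List.not_mem_nil, or_false, Prod.mk.injEq] at h
  rcases h with ⟨rfl, rfl⟩|⟨rfl, rfl⟩|⟨rfl, rfl⟩|⟨rfl, rfl⟩|⟨rfl, rfl⟩|⟨rfl, rfl⟩|⟨rfl, rfl⟩|⟨rfl, rfl⟩|⟨rfl, rfl⟩|⟨rfl, rfl⟩|⟨rfl, rfl⟩|⟨rfl, rfl⟩|⟨rfl, rfl⟩|⟨rfl, rfl⟩|⟨rfl, rfl⟩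
  · by_cases h1 : w = "ackn"
    · subst h1; rw [kmInv_get?_eq]; simp
    · by_cases h2 : w = "ack"
      · subst h2; rw [kmInv_get?_eq]; simp
      · have g1 : ¬ ("ackn" = w) := fun e => h1 e.symm
        have g2 : ¬ ("ack" = w) := fun e => h2 e.symm
        rw [kmInv_get?_eq]
        simp [km_beq_ite, g1, g2, h1, h2]
  · by_cases h1 : w = "affirm"
    · subst h1; rw [kmInv_get?_eq]; simp
    · have g1 : ¬ ("affirm" = w) := fun e => h1 e.symm
      rw [kmInv_get?_eq]
      simp [km_beq_ite, g1, h1]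
  · by_cases h1 : w = "bye"
    · subst h1; rw [kmInv_get?_eq]; simp
    · have g1 : ¬ ("bye" = w) := fun e => h1 e.symm
      rw [kmInv_get?_eq]
      simp [km_beq_ite, g1, h1]
  · by_cases h1 : w = "confirm"
    · subst h1; rw [kmInv_get?_eq]; simp
    · have g1 : ¬ ("confirm" = w) := fun e => h1 e.symm
      rw [kmInv_get?_eq]
      simp [km_beq_ite, g1, h1]
  · by_cases h1 : w = "deny"
    · subst h1; rw [kmInv_get?_eq]; simp
    · have g1 : ¬ ("deny" = w) := fun e => h1 e.symm
      rw [kmInv_get?_eq]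
      simp [km_beq_ite, g1, h1]
  · by_cases h1 : w = "hello"
    · subst h1; rw [kmInv_get?_eq]; simp
    · have g1 : ¬ ("hello" = w) := fun e => h1 e.symm
      rw [kmInv_get?_eq]
      simp [km_beq_ite, g1, h1]
  · by_cases h1 : w = "inform"
    · subst h1; rw [kmInv_get?_eq]; simp
    · have g1 : ¬ ("inform" = w) := fun e => h1 e.symm
      rw [kmInv_get?_eq]
      simp [km_beq_ite, g1, h1]
  · by_cases h1 : w = "negate"
    · subst h1; rw [kmInv_get?_eq]; simp
    · have g1 : ¬ ("negate" = w) := fun e => h1 e.symm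
      rw [kmInv_get?_eq]
      simp [km_beq_ite, g1, h1]
  · by_cases h1 : w = "null"
    · subst h1; rw [kmInv_get?_eq]; simp
    · have g1 : ¬ ("null" = w) := fun e => h1 e.symm
      rw [kmInv_get?_eq]
      simp [km_beq_ite, g1, h1]
  · by_cases h1 : w = "repeat"
    · subst h1; rw [kmInv_get?_eq]; simp
    · have g1 : ¬ ("repeat" = w) := fun e => h1 e.symm
      rw [kmInv_get?_eq]
      simp [km_beq_ite, g1, h1]
  · by_cases h1 : w = "reqalts"
    · subst h1; rw [kmInv_get?_eq]; simp
    · have g1 : ¬ ("reqalts" = w) := fun e => h1 e.symm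
      rw [kmInv_get?_eq]
      simp [km_beq_ite, g1, h1]
  · by_cases h1 : w = "reqmore"
    · subst h1; rw [kmInv_get?_eq]; simp
    · have g1 : ¬ ("reqmore" = w) := fun e => h1 e.symm
      rw [kmInv_get?_eq]
      simp [km_beq_ite, g1, h1]
  · by_cases h1 : w = "request"
    · subst h1; rw [kmInv_get?_eq]; simp
    · have g1 : ¬ ("request" = w) := fun e => h1 e.symm
      rw [kmInv_get?_eq]
      simp [km_beq_ite, g1, h1]
  · by_cases h1 : w = "restart"
    · subst h1; rw [kmInv_get?_eq]; simp
    · have g1 : ¬ ("restart" = w) := fun e => h1 e.symm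
      rw [kmInv_get?_eq]
      simp [km_beq_ite, g1, h1]
  · by_cases h1 : w = "thankyou"
    · subst h1; rw [kmInv_get?_eq]; simp
    · have g1 : ¬ ("thankyou" = w) := fun e => h1 e.symm
      rw [kmInv_get?_eq]
      simp [km_beq_ite, g1, h1]

-- every act stored in the inverted map is one of the 15 act keys
theorem km_get?_mem_values {κ ν : Type} [BEq κ] (l : List (κ × ν)) (w : κ) (b : ν) :
    (PySem.Dict.mk l).get? w = some b → b ∈ l.map (fun p => p.2) := by
  induction l with
  | nil => intro h; exact absurd h (by simp [show (PySem.Dict.mk ([] : List (κ × ν))).get? w = none from rfl])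
  | cons p l ih =>
    intro h
    rw [PySem.Dict.get?_mk_cons] at h
    by_cases hc : (p.1 == w) = true
    · rw [if_pos hc] at h
      simp only [Option.some.injEq] at h
      simp [← h]
    · rw [if_neg hc] at h
      simp [ih h]

theorem km_hrange (w b : String) (h : kmInv.get? w = some b) : b ∈ kmActNames := by
  rw [kmInv_eq] at h
  have hmem := km_get?_mem_values _ _ _ h
  simp only [List.map_cons, List.map_nil, List.mem_cons, List.not_mem_nil, or_false] at hmem
  simp only [kmActNames, List.mem_cons, List.not_mem_nil, or_false]
  tauto

theorem kmActNames_nodup : kmActNames.Nodup := by simp [kmActNames]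

-- the two initial dicts of B, as literals (stated over the literal key list so the
-- rewrites still apply after `kmActNames` has been unfolded)
theorem km_initT : kmActNames.foldl (fun d a => d.insert a (0 : Int)) PySem.Dict.empty =
    PySem.Dict.mk (kmActNames.map (fun a => (a, (0 : Int)))) := by
  apply PySem.Dict.ext
  simp [kmActNames, PySem.Dict.items_insert, PySem.Dict.contains_insert, PySem.Dict.empty]

theorem km_initF : kmActNames.foldl (fun d a => d.insert a ([] : PySem.Set String)) PySem.Dict.empty =
    PySem.Dict.mk (kmActNames.map (fun a => (a, ([] : PySem.Set String)))) := by
  apply PySem.Dict.ext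
  simp [kmActNames, PySem.Dict.items_insert, PySem.Dict.contains_insert, PySem.Dict.empty]

theorem km_initT_getD (a : String) :
    ((["ack_keywords", "affirm_keywords", "bye_keywords", "confirm_keywords", "deny_keywords", "hello_keywords", "inform_keywords", "negate_keywords", "null_keywords", "repeat_keywords", "reqalts_keywords", "reqmore_keywords", "request_keywords", "restart_keywords", "thankyou_keywords"] : List String).foldl (fun d a => d.insert a (0 : Int)) PySem.Dict.empty).getD a 0 = 0 := by
  rw [show (["ack_keywords", "affirm_keywords", "bye_keywords", "confirm_keywords", "deny_keywords", "hello_keywords", "inform_keywords", "negate_keywords", "null_keywords", "repeat_keywords", "reqalts_keywords", "reqmore_keywords", "request_keywords", "restart_keywords", "thankyou_keywords"] : List String) = kmActNames from rfl, km_initT]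
  simp only [kmActNames, List.map_cons, List.map_nil]
  simp only [PySem.Dict.getD_eq_get?_getD, PySem.Dict.get?_mk_cons, km_getD_ite, Option.getD_some,
    show ∀ x, (PySem.Dict.mk ([] : List (String × Int))).get? x = none from fun _ => rfl,
    Option.getD_none, ite_self]

theorem km_initF_getD (a : String) :
    ((["ack_keywords", "affirm_keywords", "bye_keywords", "confirm_keywords", "deny_keywords", "hello_keywords", "inform_keywords", "negate_keywords", "null_keywords", "repeat_keywords", "reqalts_keywords", "reqmore_keywords", "request_keywords", "restart_keywords", "thankyou_keywords"] : List String).foldl (fun d a => d.insert a ([] : PySem.Set String)) PySem.Dict.empty).getD a [] = [] := by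
  rw [show (["ack_keywords", "affirm_keywords", "bye_keywords", "confirm_keywords", "deny_keywords", "hello_keywords", "inform_keywords", "negate_keywords", "null_keywords", "repeat_keywords", "reqalts_keywords", "reqmore_keywords", "request_keywords", "restart_keywords", "thankyou_keywords"] : List String) = kmActNames from rfl, km_initF]
  simp only [kmActNames, List.map_cons, List.map_nil]
  simp only [PySem.Dict.getD_eq_get?_getD, PySem.Dict.get?_mk_cons, km_getD_ite, Option.getD_some,
    show ∀ x, (PySem.Dict.mk ([] : List (String × PySem.Set String))).get? x = none from fun _ => rfl,
    Option.getD_none, ite_self]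

-- A's normalized score dicts
theorem km_lensF (ws : List String) :
    kmActs.items.foldl (fun d kv =>
        d.insert kv.1 (PySem.Set.len (PySem.Set.inter (PySem.Set.ofList kv.2) ws))) PySem.Dict.empty =
    PySem.Dict.mk (kmPairs.map (fun kv =>
        (kv.1, PySem.Set.len (PySem.Set.inter (PySem.Set.ofList kv.2) ws)))) := by
  rw [kmActs_items]
  apply PySem.Dict.ext
  simp [kmPairs, PySem.Dict.items_insert, PySem.Dict.contains_insert, PySem.Dict.empty]

theorem km_lensT (ws : List String) :
    kmActs.items.foldl (fun d kv =>
        d.insert kv.1 (kv.2.foldl (fun m k => m + (ws.count k : Int)) 0)) PySem.Dict.empty =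
    PySem.Dict.mk (kmPairs.map (fun kv =>
        (kv.1, kv.2.foldl (fun m k => m + (ws.count k : Int)) 0))) := by
  rw [kmActs_items]
  apply PySem.Dict.ext
  simp [kmPairs, PySem.Dict.items_insert, PySem.Dict.contains_insert, PySem.Dict.empty]

-- B's single pass keeps exactly the 15 act keys …
theorem km_fold_keys {ν : Type} (d0 : ν) (f : String → ν → ν) (ws : List String) :
    ∀ (d : PySem.Dict String ν), d.keys = kmActNames →
    (ws.foldl (fun d w => (kmInv.get? w).elim d (fun act => d.modify act d0 (f w))) d).keys = kmActNames := by
  induction ws with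
  | nil => intro d hd; simpa using hd
  | cons w ws ih =>
    intro d hd
    cases h : kmInv.get? w with
    | none => simpa [h] using ih d hd
    | some b =>
      have hb : d.contains b = true := (PySem.Dict.contains_iff_mem_keys d b).2 (hd ▸ km_hrange w b h)
      have hk : (d.modify b d0 (f w)).keys = kmActNames := by
        rw [PySem.Dict.keys_modify, PySem.Dict.keys_insert_of_contains _ _ hb, hd]
      simpa [h] using ih _ hk

-- … and at key a it folds f over exactly the words that map to act a
theorem km_fold_getD {ν : Type} (d0 : ν) (f : String → ν → ν) (ws : List String) (a : String) :
    ∀ (d : PySem.Dict String ν),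
    (ws.foldl (fun d w => (kmInv.get? w).elim d (fun act => d.modify act d0 (f w))) d).getD a d0
      = (ws.filter (fun w => kmInv.get? w == some a)).foldl (fun v w => f w v) (d.getD a d0) := by
  induction ws with
  | nil => intro d; simp
  | cons w ws ih =>
    intro d
    cases h : kmInv.get? w with
    | none =>
      have hp : (kmInv.get? w == some a) = false := by rw [h]; rfl
      simp [h, List.filter_cons, hp, ih]
    | some b =>
      simp only [List.foldl_cons, List.filter_cons, h, km_elim_some]
      by_cases hab : a = b
      · subst hab
        have ht : (some a == some a) = true := by simp
        rw [ih, PySem.Dict.getD_modify]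
        simp [ht, List.foldl_cons]
      · have hba : ¬ b = a := fun e => hab e.symm
        have hf : (some b == some a) = false := by simp [hba]
        rw [ih, PySem.Dict.getD_modify]
        simp [hf, hab]

theorem km_foldl_add_one (l : List String) : ∀ (x : Int),
    l.foldl (fun v (_ : String) => v + 1) x = x + l.length := by
  induction l with
  | nil => intro x; simp
  | cons y l ih => intro x; simp [ih]; omega

-- counting words that lie in a duplicate-free keyword list = summing the individual counts
theorem km_countP_mem_cons (k : String) (ks : List String) (hk : k ∉ ks) (ws : List String) :
    ws.countP (fun w => decide (w ∈ k :: ks)) = ws.count k + ws.countP (fun w => decide (w ∈ ks)) := by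
  induction ws with
  | nil => simp
  | cons w ws ih =>
    rw [List.countP_cons, List.countP_cons, List.count_cons, ih]
    by_cases hw : w = k
    · subst hw
      have h1 : decide (w ∈ w :: ks) = true := by simp
      have h2 : decide (w ∈ ks) = false := by simpa using hk
      have h3 : (w == w) = true := by simp
      rw [h1, h2, h3]
      simp
      omega
    · have h1 : decide (w ∈ k :: ks) = decide (w ∈ ks) := by simp [List.mem_cons, hw]
      have h3 : (w == k) = false := by simp [hw]
      rw [h1, h3]
      simp
      omega

theorem km_cntEq (ks : List String) (hks : ks.Nodup) (ws : List String) : ∀ (x : Int),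
    ks.foldl (fun m k => m + (ws.count k : Int)) x = x + (ws.countP (fun w => decide (w ∈ ks)) : Int) := by
  induction ks with
  | nil => intro x; simp
  | cons k ks ih =>
    intro x
    rcases List.nodup_cons.mp hks with ⟨hk, hnd⟩
    rw [List.foldl_cons, ih hnd, km_countP_mem_cons k ks hk ws]
    push_cast
    ring

-- distinct matched words = matched distinct keywords (both sides are duplicate-free lists
-- with the same membership)
theorem km_lenEq (ks ws : List String) (p : String → Bool) (hks : ks.Nodup)
    (hp : ∀ w, p w = decide (w ∈ ks)) :
    PySem.Set.len (PySem.Set.inter (PySem.Set.ofList ks) ws)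
      = PySem.Set.len ((ws.filter p).foldl PySem.Set.add []) := by
  rw [← PySem.Set.ofList_eq_foldl]
  have h1 : (PySem.Set.inter (PySem.Set.ofList ks) ws).Nodup := (PySem.Set.nodup_ofList ks).filter _
  have h2 : (PySem.Set.ofList (ws.filter p)).Nodup := PySem.Set.nodup_ofList _
  have hm : ∀ x, x ∈ PySem.Set.inter (PySem.Set.ofList ks) ws ↔ x ∈ PySem.Set.ofList (ws.filter p) := by
    intro x
    constructor
    · intro hx
      rcases List.mem_filter.mp hx with ⟨hx1, hx2⟩
      have hxks : x ∈ ks := (PySem.Set.mem_ofList ks x).mp hx1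
      have hxws : x ∈ ws := by simpa [PySem.Set.contains, List.elem_iff] using hx2
      exact (PySem.Set.mem_ofList _ x).mpr (List.mem_filter.mpr ⟨hxws, by simp [hp, hxks]⟩)
    · intro hx
      rcases List.mem_filter.mp ((PySem.Set.mem_ofList _ x).mp hx) with ⟨hxws, hxp⟩
      have hxks : x ∈ ks := by
        have h := hxp
        rw [hp] at h
        exact of_decide_eq_true h
      refine List.mem_filter.mpr ⟨(PySem.Set.mem_ofList ks x).mpr hxks, ?_⟩
      simp [PySem.Set.contains, hxws]
  have hlen : (PySem.Set.inter (PySem.Set.ofList ks) ws).length = (PySem.Set.ofList (ws.filter p)).length := by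
    rw [← List.toFinset_card_of_nodup h1, ← List.toFinset_card_of_nodup h2]
    congr 1
    ext x
    simp only [List.mem_toFinset]
    exact hm x
  simp [PySem.Set.len, hlen]

-- the two score dicts are equal (repetition = False)
theorem km_dictF (ws : List String) :
    kmActs.items.foldl (fun d kv =>
        d.insert kv.1 (PySem.Set.len (PySem.Set.inter (PySem.Set.ofList kv.2) ws))) PySem.Dict.empty
      = PySem.Dict.mk
          ((ws.foldl (fun d w => (kmInv.get? w).elim d (fun act => d.modify act [] (fun s => PySem.Set.add s w)))
              (kmActNames.foldl (fun d a => d.insert a ([] : PySem.Set String)) PySem.Dict.empty)).items.map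
            (fun kv => (kv.1, PySem.Set.len kv.2))) := by
  have hkeys := km_fold_keys ([] : PySem.Set String) (fun w s => PySem.Set.add s w) ws
      (kmActNames.foldl (fun d a => d.insert a ([] : PySem.Set String)) PySem.Dict.empty)
      (by rw [km_initF]; simp [kmActNames])
  have hnd : ((ws.foldl (fun d w => (kmInv.get? w).elim d (fun act => d.modify act [] (fun s => PySem.Set.add s w)))
      (kmActNames.foldl (fun d a => d.insert a ([] : PySem.Set String)) PySem.Dict.empty)).keys).Nodup := by
    rw [hkeys]; exact kmActNames_nodup
  apply PySem.Dict.ext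
  rw [km_lensF, km_items_mk, km_items_mk,
    PySem.Dict.items_eq_map_keys _ hnd ([] : PySem.Set String), hkeys, List.map_map]
  simp only [kmPairs, kmActNames, List.map_cons, List.map_nil, Function.comp_apply,
    List.cons.injEq, Prod.mk.injEq, and_true, true_and]
  refine ⟨?_, ?_, ?_, ?_, ?_, ?_, ?_, ?_, ?_, ?_, ?_, ?_, ?_, ?_, ?_⟩
  · rw [km_fold_getD, km_initF_getD,
        List.filter_congr (fun x _ => km_hinv "ack_keywords" ["ackn", "ack"] (by simp [kmPairs]) x)]
    exact km_lenEq ["ackn", "ack"] _ _ (by simp) (fun w => rfl)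
  · rw [km_fold_getD, km_initF_getD,
        List.filter_congr (fun x _ => km_hinv "affirm_keywords" ["affirm"] (by simp [kmPairs]) x)]
    exact km_lenEq ["affirm"] _ _ (by simp) (fun w => rfl)
  · rw [km_fold_getD, km_initF_getD,
        List.filter_congr (fun x _ => km_hinv "bye_keywords" ["bye"] (by simp [kmPairs]) x)]
    exact km_lenEq ["bye"] _ _ (by simp) (fun w => rfl)
  · rw [km_fold_getD, km_initF_getD,
        List.filter_congr (fun x _ => km_hinv "confirm_keywords" ["confirm"] (by simp [kmPairs]) x)]
    exact km_lenEq ["confirm"] _ _ (by simp) (fun w => rfl)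
  · rw [km_fold_getD, km_initF_getD,
        List.filter_congr (fun x _ => km_hinv "deny_keywords" ["deny"] (by simp [kmPairs]) x)]
    exact km_lenEq ["deny"] _ _ (by simp) (fun w => rfl)
  · rw [km_fold_getD, km_initF_getD,
        List.filter_congr (fun x _ => km_hinv "hello_keywords" ["hello"] (by simp [kmPairs]) x)]
    exact km_lenEq ["hello"] _ _ (by simp) (fun w => rfl)
  · rw [km_fold_getD, km_initF_getD,
        List.filter_congr (fun x _ => km_hinv "inform_keywords" ["inform"] (by simp [kmPairs]) x)]
    exact km_lenEq ["inform"] _ _ (by simp) (fun w => rfl)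
  · rw [km_fold_getD, km_initF_getD,
        List.filter_congr (fun x _ => km_hinv "negate_keywords" ["negate"] (by simp [kmPairs]) x)]
    exact km_lenEq ["negate"] _ _ (by simp) (fun w => rfl)
  · rw [km_fold_getD, km_initF_getD,
        List.filter_congr (fun x _ => km_hinv "null_keywords" ["null"] (by simp [kmPairs]) x)]
    exact km_lenEq ["null"] _ _ (by simp) (fun w => rfl)
  · rw [km_fold_getD, km_initF_getD,
        List.filter_congr (fun x _ => km_hinv "repeat_keywords" ["repeat"] (by simp [kmPairs]) x)]
    exact km_lenEq ["repeat"] _ _ (by simp) (fun w => rfl)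
  · rw [km_fold_getD, km_initF_getD,
        List.filter_congr (fun x _ => km_hinv "reqalts_keywords" ["reqalts"] (by simp [kmPairs]) x)]
    exact km_lenEq ["reqalts"] _ _ (by simp) (fun w => rfl)
  · rw [km_fold_getD, km_initF_getD,
        List.filter_congr (fun x _ => km_hinv "reqmore_keywords" ["reqmore"] (by simp [kmPairs]) x)]
    exact km_lenEq ["reqmore"] _ _ (by simp) (fun w => rfl)
  · rw [km_fold_getD, km_initF_getD,
        List.filter_congr (fun x _ => km_hinv "request_keywords" ["request"] (by simp [kmPairs]) x)]
    exact km_lenEq ["request"] _ _ (by simp) (fun w => rfl)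
  · rw [km_fold_getD, km_initF_getD,
        List.filter_congr (fun x _ => km_hinv "restart_keywords" ["restart"] (by simp [kmPairs]) x)]
    exact km_lenEq ["restart"] _ _ (by simp) (fun w => rfl)
  · rw [km_fold_getD, km_initF_getD,
        List.filter_congr (fun x _ => km_hinv "thankyou_keywords" ["thankyou"] (by simp [kmPairs]) x)]
    exact km_lenEq ["thankyou"] _ _ (by simp) (fun w => rfl)

-- the two score dicts are equal (repetition = True)
theorem km_dictT (ws : List String) :
    kmActs.items.foldl (fun d kv =>
        d.insert kv.1 (kv.2.foldl (fun m k => m + (ws.count k : Int)) 0)) PySem.Dict.empty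
      = ws.foldl (fun d w => (kmInv.get? w).elim d (fun act => d.modify act 0 (· + 1)))
          (kmActNames.foldl (fun d a => d.insert a (0 : Int)) PySem.Dict.empty) := by
  have hkeys := km_fold_keys (0 : Int) (fun _ v => v + 1) ws
      (kmActNames.foldl (fun d a => d.insert a (0 : Int)) PySem.Dict.empty)
      (by rw [km_initT]; simp [kmActNames])
  have hnd : ((ws.foldl (fun d w => (kmInv.get? w).elim d (fun act => d.modify act 0 (· + 1)))
      (kmActNames.foldl (fun d a => d.insert a (0 : Int)) PySem.Dict.empty)).keys).Nodup := by
    rw [hkeys]; exact kmActNames_nodup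
  apply PySem.Dict.ext
  rw [km_lensT, km_items_mk,
    PySem.Dict.items_eq_map_keys _ hnd (0 : Int), hkeys]
  simp only [kmPairs, kmActNames, List.map_cons, List.map_nil,
    List.cons.injEq, Prod.mk.injEq, and_true, true_and]
  refine ⟨?_, ?_, ?_, ?_, ?_, ?_, ?_, ?_, ?_, ?_, ?_, ?_, ?_, ?_, ?_⟩
  · rw [km_fold_getD, km_initT_getD,
        List.filter_congr (fun x _ => km_hinv "ack_keywords" ["ackn", "ack"] (by simp [kmPairs]) x),
        km_foldl_add_one, km_cntEq ["ackn", "ack"] (by simp) _ 0, List.countP_eq_length_filter]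
  · rw [km_fold_getD, km_initT_getD,
        List.filter_congr (fun x _ => km_hinv "affirm_keywords" ["affirm"] (by simp [kmPairs]) x),
        km_foldl_add_one, km_cntEq ["affirm"] (by simp) _ 0, List.countP_eq_length_filter]
  · rw [km_fold_getD, km_initT_getD,
        List.filter_congr (fun x _ => km_hinv "bye_keywords" ["bye"] (by simp [kmPairs]) x),
        km_foldl_add_one, km_cntEq ["bye"] (by simp) _ 0, List.countP_eq_length_filter]
  · rw [km_fold_getD, km_initT_getD,
        List.filter_congr (fun x _ => km_hinv "confirm_keywords" ["confirm"] (by simp [kmPairs]) x),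
        km_foldl_add_one, km_cntEq ["confirm"] (by simp) _ 0, List.countP_eq_length_filter]
  · rw [km_fold_getD, km_initT_getD,
        List.filter_congr (fun x _ => km_hinv "deny_keywords" ["deny"] (by simp [kmPairs]) x),
        km_foldl_add_one, km_cntEq ["deny"] (by simp) _ 0, List.countP_eq_length_filter]
  · rw [km_fold_getD, km_initT_getD,
        List.filter_congr (fun x _ => km_hinv "hello_keywords" ["hello"] (by simp [kmPairs]) x),
        km_foldl_add_one, km_cntEq ["hello"] (by simp) _ 0, List.countP_eq_length_filter]
  · rw [km_fold_getD, km_initT_getD,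
        List.filter_congr (fun x _ => km_hinv "inform_keywords" ["inform"] (by simp [kmPairs]) x),
        km_foldl_add_one, km_cntEq ["inform"] (by simp) _ 0, List.countP_eq_length_filter]
  · rw [km_fold_getD, km_initT_getD,
        List.filter_congr (fun x _ => km_hinv "negate_keywords" ["negate"] (by simp [kmPairs]) x),
        km_foldl_add_one, km_cntEq ["negate"] (by simp) _ 0, List.countP_eq_length_filter]
  · rw [km_fold_getD, km_initT_getD,
        List.filter_congr (fun x _ => km_hinv "null_keywords" ["null"] (by simp [kmPairs]) x),
        km_foldl_add_one, km_cntEq ["null"] (by simp) _ 0, List.countP_eq_length_filter]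
  · rw [km_fold_getD, km_initT_getD,
        List.filter_congr (fun x _ => km_hinv "repeat_keywords" ["repeat"] (by simp [kmPairs]) x),
        km_foldl_add_one, km_cntEq ["repeat"] (by simp) _ 0, List.countP_eq_length_filter]
  · rw [km_fold_getD, km_initT_getD,
        List.filter_congr (fun x _ => km_hinv "reqalts_keywords" ["reqalts"] (by simp [kmPairs]) x),
        km_foldl_add_one, km_cntEq ["reqalts"] (by simp) _ 0, List.countP_eq_length_filter]
  · rw [km_fold_getD, km_initT_getD,
        List.filter_congr (fun x _ => km_hinv "reqmore_keywords" ["reqmore"] (by simp [kmPairs]) x),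
        km_foldl_add_one, km_cntEq ["reqmore"] (by simp) _ 0, List.countP_eq_length_filter]
  · rw [km_fold_getD, km_initT_getD,
        List.filter_congr (fun x _ => km_hinv "request_keywords" ["request"] (by simp [kmPairs]) x),
        km_foldl_add_one, km_cntEq ["request"] (by simp) _ 0, List.countP_eq_length_filter]
  · rw [km_fold_getD, km_initT_getD,
        List.filter_congr (fun x _ => km_hinv "restart_keywords" ["restart"] (by simp [kmPairs]) x),
        km_foldl_add_one, km_cntEq ["restart"] (by simp) _ 0, List.countP_eq_length_filter]
  · rw [km_fold_getD, km_initT_getD,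
        List.filter_congr (fun x _ => km_hinv "thankyou_keywords" ["thankyou"] (by simp [kmPairs]) x),
        km_foldl_add_one, km_cntEq ["thankyou"] (by simp) _ 0, List.countP_eq_length_filter]

theorem km_main (u : String) (r : Bool) :
    keywordMatching_py u r = keywordMatching_py_alt u r := by
  cases r with
  | false =>
    simp only [keywordMatching_py, keywordMatching_py_alt, reduceIte, Bool.false_eq_true, if_false]
    rw [km_dictF ((PySem.Str.split? u " ").getD [])]
  | true =>
    simp only [keywordMatching_py, keywordMatching_py_alt, reduceIte, Bool.true_eq_false, if_false]
    rw [km_dictT ((PySem.Str.split? u " ").getD [])]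

-- ===== VERDICT (by name: the statement is the Claim_ definition above) =====
theorem keywordMatching_py_spec : Claim_equal_keywordMatching_py := by
  intro u r _
  unfold Spec_keywordMatching_py
  exact km_main u r
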